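-- pv_equiv track=rewrite | github.com/zmgu/AlgorithmPractice | 프로그래머스/Lv1 햄버거 만들기.py | solution
-- ===== SOURCE A (Python) =====
-- def solution(ingredient):
--     answer = 0
--
--     if len(ingredient) < 4:
--         return 0
--
--     arr = list(ingredient[:3])
--     ai = 3
--
--     for i in range(3, len(ingredient)):
--         if len(arr) >= 3:
--             if arr[ai-3] == 1 and arr[ai-2] == 2 and arr[ai-1] == 3 and ingredient[i] == 1:
--                 answer += 1
--                 arr.pop()
--                 arr.pop()
--                 arr.pop()
--                 ai -= 3
--                 continue
--         arr.append(ingredient[i])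
--         ai += 1
--
--     return answer
-- ===== SOURCE B (Python) =====
-- def solution(ingredient):
--     # repeated leftmost-pattern search-and-delete reduction (same count as A's stack pass)
--     s = list(ingredient)
--     answer = 0
--     while True:
--         found = None
--         for i in range(len(s) - 3):
--             if s[i:i+4] == [1, 2, 3, 1]:
--                 found = i
--                 break
--         if found is None:
--             return answer
--         del s[found:found+4]
--         answer += 1
-- ===== Notes on version B (the rewrite author's own statement) =====
-- stated objective: alternative
-- what changed: replaced A's single-pass stack simulation (with its ai index bookkeeping) by a repeated scan-for-leftmost-[1,2,3,1]-and-delete reduction on a working copy of the list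
import Mathlib
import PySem

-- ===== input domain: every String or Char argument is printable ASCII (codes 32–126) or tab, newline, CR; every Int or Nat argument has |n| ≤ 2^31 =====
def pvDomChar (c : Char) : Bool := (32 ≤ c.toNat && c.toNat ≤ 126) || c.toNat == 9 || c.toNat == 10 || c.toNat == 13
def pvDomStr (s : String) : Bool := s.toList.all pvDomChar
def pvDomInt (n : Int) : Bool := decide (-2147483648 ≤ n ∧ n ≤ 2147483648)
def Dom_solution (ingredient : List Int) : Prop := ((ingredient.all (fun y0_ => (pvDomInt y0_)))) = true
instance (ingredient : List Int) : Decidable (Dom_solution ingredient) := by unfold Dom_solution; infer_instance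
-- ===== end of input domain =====

-- B replaces A's one-pass stack simulation by a repeated leftmost-[1,2,3,1]-search-and-delete
-- reduction (alternative decomposition, not faster).

-- ===== PORT A =====
-- loop body of A's `for i in range(3, len(ingredient))`; A maintains ai = len(arr), so every
-- arr[ai-3]/arr[ai-2]/arr[ai-1] access Python performs is in range and pyGetD _ _ 0 is exact there.
def solutionStep (st : Int × List Int × Int) (x : Int) : Int × List Int × Int :=
  let answer := st.1
  let arr := st.2.1
  let ai := st.2.2
  if 3 ≤ arr.length ∧ PySem.List.pyGetD arr (ai - 3) 0 = 1 ∧ PySem.List.pyGetD arr (ai - 2) 0 = 2 ∧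
      PySem.List.pyGetD arr (ai - 1) 0 = 3 ∧ x = 1 then
    (answer + 1, arr.dropLast.dropLast.dropLast, ai - 3)
  else
    (answer, arr ++ [x], ai + 1)

-- `ingredient[i]` with 3 ≤ i < len(ingredient) is always in range, so pyGetD _ _ 0 is exact.
def solution (ingredient : List Int) : Int :=
  if ingredient.length < 4 then 0
  else
    ((PySem.List.pyRange 3 (ingredient.length : Int) 1).foldl
        (fun st i => solutionStep st (PySem.List.pyGetD ingredient i 0))
        (0, PySem.List.slice ingredient none (some 3), 3)).1

-- ===== PORT B =====
-- these two lemmas are cited by reduceB's decreasing_by, so they stay above the port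
theorem occ_of_slice {s : List Int} {i : Nat}
    (h : PySem.List.slice s (some (i : Int)) (some ((i : Int) + 4)) = [1, 2, 3, 1]) :
    (s.drop i).take 4 = [1, 2, 3, 1] := by
  have hs := PySem.List.slice_natCast_add s i 4
  norm_num at hs
  rw [← hs]; exact h

theorem occ_le {s : List Int} {i : Nat} (h : (s.drop i).take 4 = [1, 2, 3, 1]) :
    i + 4 ≤ s.length := by
  have := congrArg List.length h
  simp [List.length_take, List.length_drop] at this
  omega

-- Source B's inner `for i in range(len(s) - 3): if s[i:i+4] == [1,2,3,1]: …; break`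
def findOcc (s : List Int) : Option Nat :=
  (List.range (s.length - 3)).find?
    (fun i => decide (PySem.List.slice s (some (i : Int)) (some ((i : Int) + 4)) = [1, 2, 3, 1]))

theorem findOcc_le {s : List Int} {i : Nat} (h : findOcc s = some i) : i + 4 ≤ s.length := by
  have hp := List.find?_some h
  simp only [decide_eq_true_eq] at hp
  exact occ_le (occ_of_slice hp)

-- Source B's `while True:` loop: delete the found occurrence (`del s[i:i+4]`), count, retry
def reduceB (s : List Int) (c : Int) : Int :=
  match h : findOcc s with
  | none => c
  | some i => reduceB (s.take i ++ s.drop (i + 4)) (c + 1)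
termination_by s.length
decreasing_by
  have := findOcc_le h
  simp [List.length_take, List.length_drop]
  omega

def solution_alt (ingredient : List Int) : Int := reduceB ingredient 0

-- ===== PRECONDITION & SPEC =====
def Spec_solution (ingredient : List Int) (out : Int) : Prop := out = solution_alt ingredient
instance (ingredient : List Int) (out : Int) : Decidable (Spec_solution ingredient out) := by unfold Spec_solution; infer_instance

-- ===== CLAIM (what is proved, stated in full; the proofs are below) =====
def Claim_equal_solution : Prop := ∀ (ingredient : List Int), Dom_solution ingredient → Spec_solution ingredient (solution ingredient)

-- ===== LEMMAS AND PROOFS =====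

-- an occurrence of the pattern [1,2,3,1] at position j
def Occ (s : List Int) (j : Nat) : Prop := (s.drop j).take 4 = [1, 2, 3, 1]

def NoOcc (s : List Int) : Prop := ∀ j, ¬ Occ s j

-- clean form of A's loop: r is the stack with head = top, xs the unread suffix, n the count
def run : List Int → List Int → Int → Int
  | _, [], n => n
  | r, x :: xs, n =>
    if r.take 3 = [3, 2, 1] ∧ x = 1 then run (r.drop 3) xs (n + 1) else run (x :: r) xs n

theorem slice_occ_iff (s : List Int) (i : Nat) :
    PySem.List.slice s (some (i : Int)) (some ((i : Int) + 4)) = [1, 2, 3, 1] ↔ Occ s i := by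
  have hs := PySem.List.slice_natCast_add s i 4
  norm_num at hs
  rw [hs]; exact Iff.rfl

theorem occ_append_iff {l t : List Int} {j : Nat} (hj : j + 4 ≤ l.length) :
    Occ (l ++ t) j ↔ Occ l j := by
  unfold Occ
  rw [List.drop_append_of_le_length (by omega),
    List.take_append_of_le_length (by simp [List.length_drop]; omega)]

theorem noocc_prefix {l t : List Int} (h : NoOcc (l ++ t)) : NoOcc l := by
  intro j hj
  exact h j ((occ_append_iff (occ_le hj)).mpr hj)

theorem noocc_short {s : List Int} (h : s.length < 4) : NoOcc s := by
  intro j hj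
  have := occ_le hj
  omega

theorem find?_range_eq_some {p : Nat → Bool} {n k : Nat} (hk : k < n) (hp : p k = true)
    (hmin : ∀ j, j < k → ¬ p j = true) : (List.range n).find? p = some k := by
  rw [List.find?_eq_some_iff_append]
  refine ⟨hp, List.range k, List.range' (k + 1) (n - k - 1), ?_, ?_⟩
  · rw [List.range_eq_range', List.range_eq_range']
    have h1 : List.range' 0 k 1 ++ List.range' (0 + 1 * k) (n - k) 1 = List.range' 0 (k + (n - k)) 1 :=
      List.range'_append
    have h2 : k + (n - k) = n := by omega
    have h3 : n - k = (n - k - 1) + 1 := by omega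
    rw [h2] at h1
    rw [← h1, h3, List.range'_succ]
    simp
  · intro a ha
    simp only [List.mem_range] at ha
    simp [hmin a ha]

theorem findOcc_eq_none {s : List Int} (h : NoOcc s) : findOcc s = none := by
  rw [findOcc, List.find?_eq_none]
  intro j _
  simp only [decide_eq_true_eq, slice_occ_iff]
  exact h j

theorem findOcc_eq_some {s : List Int} {k : Nat} (hk : Occ s k) (hmin : ∀ j, j < k → ¬ Occ s j) :
    findOcc s = some k := by
  apply find?_range_eq_some
  · have := occ_le hk; omega
  · simp only [decide_eq_true_eq, slice_occ_iff]; exact hk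
  · intro j hj
    simp only [decide_eq_true_eq, slice_occ_iff]
    exact hmin j hj

theorem noocc_push {r : List Int} {x : Int} (h : NoOcc r.reverse)
    (hne : ¬ (r.take 3 = [3, 2, 1] ∧ x = 1)) : NoOcc ((x :: r).reverse) := by
  intro j hj
  rw [List.reverse_cons] at hj
  have hlen := occ_le hj
  rw [List.length_append, List.length_reverse, List.length_singleton] at hlen
  by_cases hc : j + 4 ≤ r.reverse.length
  · exact h j ((occ_append_iff hc).mp hj)
  · rw [List.length_reverse] at hc
    have hr3 : 3 ≤ r.length := by omega
    unfold Occ at hj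
    rw [List.drop_append_of_le_length (by rw [List.length_reverse]; omega),
      List.drop_reverse, show r.length - j = 3 by omega] at hj
    obtain ⟨a, b, c, habc⟩ :=
      List.length_eq_three.mp (show (r.take 3).length = 3 by rw [List.length_take]; omega)
    rw [habc] at hj
    simp at hj
    exact hne ⟨by rw [habc, hj.1, hj.2.1, hj.2.2.1], hj.2.2.2⟩

theorem reduceB_none {s : List Int} {c : Int} (h : findOcc s = none) : reduceB s c = c := by
  rw [reduceB]
  split
  · rfl
  · rename_i i heq
    rw [h] at heq
    exact absurd heq (by simp)

theorem reduceB_some {s : List Int} {c : Int} {i : Nat} (h : findOcc s = some i) :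
    reduceB s c = reduceB (s.take i ++ s.drop (i + 4)) (c + 1) := by
  rw [reduceB]
  split
  · rename_i heq
    rw [h] at heq
    exact absurd heq (by simp)
  · rename_i j heq
    rw [h] at heq
    cases heq
    rfl

theorem run_reduce : ∀ (xs r : List Int) (n : Int), NoOcc r.reverse →
    run r xs n = reduceB (r.reverse ++ xs) n := by
  intro xs
  induction xs with
  | nil =>
    intro r n h
    rw [List.append_nil, reduceB_none (findOcc_eq_none h)]
    rfl
  | cons x xs ih =>
    intro r n h
    by_cases hp : r.take 3 = [3, 2, 1] ∧ x = 1
    · have h3 := hp.1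
      obtain rfl := hp.2
      rcases r with _ | ⟨a, _ | ⟨b, _ | ⟨c, r'⟩⟩⟩ <;> simp at h3
      obtain ⟨rfl, rfl, rfl⟩ := h3
      have hrev : ((3 : Int) :: 2 :: 1 :: r').reverse = r'.reverse ++ [1, 2, 3] := by simp
      have hword : ((3 : Int) :: 2 :: 1 :: r').reverse ++ 1 :: xs =
          r'.reverse ++ ([1, 2, 3, 1] ++ xs) := by
        rw [hrev]; simp
      have hNo' : NoOcc r'.reverse := noocc_prefix (t := [1, 2, 3]) (hrev ▸ h)
      have hOcck : Occ (r'.reverse ++ ([1, 2, 3, 1] ++ xs)) r'.length := by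
        unfold Occ
        rw [show r'.length = r'.reverse.length by simp, List.drop_left]
        simp
      have hfind : findOcc (r'.reverse ++ ([1, 2, 3, 1] ++ xs)) = some r'.length := by
        apply findOcc_eq_some hOcck
        intro j hj hOcc
        have hc : j + 4 ≤ (((3 : Int) :: 2 :: 1 :: r').reverse).length := by simp; omega
        apply h j
        apply (occ_append_iff (t := 1 :: xs) hc).mp
        have : ((3 : Int) :: 2 :: 1 :: r').reverse ++ 1 :: xs =
            r'.reverse ++ ([1, 2, 3, 1] ++ xs) := hword
        rw [this]
        exact hOcc
      have hrun : run ((3 : Int) :: 2 :: 1 :: r') (1 :: xs) n = run r' xs (n + 1) := by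
        rw [run]
        rw [if_pos ⟨by simp, rfl⟩]
        simp
      rw [hrun, hword, reduceB_some hfind]
      have htake : (r'.reverse ++ ([1, 2, 3, 1] ++ xs)).take r'.length = r'.reverse := by
        rw [show r'.length = r'.reverse.length by simp, List.take_left]
      have hdrop : (r'.reverse ++ ([1, 2, 3, 1] ++ xs)).drop (r'.length + 4) = xs := by
        rw [List.drop_append]
        rw [show r'.length + 4 - r'.reverse.length = 4 by simp]
        rw [List.drop_eq_nil_of_le (by simp)]
        simp
      rw [htake, hdrop]
      exact ih r' (n + 1) hNo'
    · have hrun : run r (x :: xs) n = run (x :: r) xs n := by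
        rw [run, if_neg hp]
      have hword : r.reverse ++ x :: xs = (x :: r).reverse ++ xs := by
        rw [List.reverse_cons, List.append_assoc]
        simp
      rw [hrun, hword]
      exact ih (x :: r) n (noocc_push h hp)

theorem cond_iff (r : List Int) (x : Int) :
    (3 ≤ r.reverse.length ∧ PySem.List.pyGetD r.reverse ((r.length : Int) - 3) 0 = 1 ∧
      PySem.List.pyGetD r.reverse ((r.length : Int) - 2) 0 = 2 ∧
      PySem.List.pyGetD r.reverse ((r.length : Int) - 1) 0 = 3 ∧ x = 1) ↔
    (r.take 3 = [3, 2, 1] ∧ x = 1) := by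
  rcases r with _ | ⟨a, _ | ⟨b, _ | ⟨c, r'⟩⟩⟩
  · simp
  · simp
  · simp
  · have hrev : (a :: b :: c :: r').reverse = r'.reverse ++ [c, b, a] := by simp
    have hlen : ((a :: b :: c :: r').length : Int) = (r'.length : Int) + 3 := by
      push_cast [List.length_cons]
      ring
    have e0 : PySem.List.pyGetD (a :: b :: c :: r').reverse
        (((a :: b :: c :: r').length : Int) - 3) 0 = c := by
      rw [hlen, show (r'.length : Int) + 3 - 3 = ((r'.length : Nat) : Int) by ring,
        PySem.List.pyGetD_natCast, hrev,
        List.getD_append_right _ _ _ _ (by simp), List.length_reverse]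
      simp
    have e1 : PySem.List.pyGetD (a :: b :: c :: r').reverse
        (((a :: b :: c :: r').length : Int) - 2) 0 = b := by
      rw [hlen, show (r'.length : Int) + 3 - 2 = (((r'.length + 1) : Nat) : Int) by push_cast; ring,
        PySem.List.pyGetD_natCast, hrev,
        List.getD_append_right _ _ _ _ (by simp), List.length_reverse]
      simp
    have e2 : PySem.List.pyGetD (a :: b :: c :: r').reverse
        (((a :: b :: c :: r').length : Int) - 1) 0 = a := by
      rw [hlen, show (r'.length : Int) + 3 - 1 = (((r'.length + 2) : Nat) : Int) by push_cast; ring,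
        PySem.List.pyGetD_natCast, hrev,
        List.getD_append_right _ _ _ _ (by simp), List.length_reverse]
      simp
    rw [e0, e1, e2, show (a :: b :: c :: r').take 3 = [a, b, c] from rfl]
    constructor
    · rintro ⟨-, h1, h2, h3, h4⟩
      exact ⟨by rw [h1, h2, h3], h4⟩
    · rintro ⟨h1, h4⟩
      obtain ⟨ha, hb, hc⟩ : a = 3 ∧ b = 2 ∧ c = 1 := by simpa using h1
      exact ⟨by simp, hc, hb, ha, h4⟩

theorem foldl_run : ∀ (xs r : List Int) (ans : Int),
    (xs.foldl solutionStep (ans, r.reverse, (r.length : Int))).1 = run r xs ans := by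
  intro xs
  induction xs with
  | nil => intro r ans; rw [run]; rfl
  | cons x xs ih =>
    intro r ans
    rw [List.foldl_cons]
    by_cases hp : r.take 3 = [3, 2, 1] ∧ x = 1
    · have h3 := hp.1
      rcases r with _ | ⟨a, _ | ⟨b, _ | ⟨c, r'⟩⟩⟩ <;> simp at h3
      obtain ⟨rfl, rfl, rfl⟩ := h3
      have hstep : solutionStep (ans, ((3 : Int) :: 2 :: 1 :: r').reverse,
          (((3 : Int) :: 2 :: 1 :: r').length : Int)) x =
          (ans + 1, r'.reverse, (r'.length : Int)) := by
        rw [solutionStep]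
        rw [if_pos ((cond_iff ((3 : Int) :: 2 :: 1 :: r') x).mpr hp)]
        refine congrArg (Prod.mk _) (congrArg₂ Prod.mk ?_ ?_)
        · show (((3 : Int) :: 2 :: 1 :: r').reverse).dropLast.dropLast.dropLast = r'.reverse
          rw [show ((3 : Int) :: 2 :: 1 :: r').reverse = (r'.reverse ++ [1, 2]) ++ [3] by simp]
          rw [List.dropLast_concat]
          rw [show r'.reverse ++ [(1 : Int), 2] = (r'.reverse ++ [1]) ++ [2] by simp]
          rw [List.dropLast_concat, List.dropLast_concat]
        · show (((3 : Int) :: 2 :: 1 :: r').length : Int) - 3 = (r'.length : Int)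
          push_cast [List.length_cons]
          ring
      rw [hstep, ih r' (ans + 1), run, if_pos hp]
      simp
    · have hstep : solutionStep (ans, r.reverse, (r.length : Int)) x =
          (ans, (x :: r).reverse, ((x :: r).length : Int)) := by
        rw [solutionStep]
        rw [if_neg (fun hcc => hp ((cond_iff r x).mp hcc))]
        refine congrArg (Prod.mk _) (congrArg₂ Prod.mk ?_ ?_)
        · show r.reverse ++ [x] = (x :: r).reverse
          simp
        · show (r.length : Int) + 1 = ((x :: r).length : Int)
          simp
      rw [hstep, ih (x :: r) ans, run, if_neg hp]

-- ===== VERDICT (by name: the statement is the Claim_ definition above) =====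
theorem solution_spec : Claim_equal_solution := by
  intro ing _
  show solution ing = solution_alt ing
  rw [solution, solution_alt]
  by_cases hlt : ing.length < 4
  · rw [if_pos hlt, reduceB_none (findOcc_eq_none (noocc_short hlt))]
  · rw [if_neg hlt]
    have h4 : 4 ≤ ing.length := by omega
    have hsl : PySem.List.slice ing none (some 3) = ing.take 3 := by
      have := PySem.List.slice_to_natCast ing 3
      norm_num at this
      exact this
    rw [hsl]
    rw [PySem.List.foldl_pyRange_pyGetD' ing 0 solutionStep (0, ing.take 3, 3)
      (by norm_num : (0 : Int) ≤ 3)]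
    have hr0 : ing.take 3 = ((ing.take 3).reverse).reverse := (List.reverse_reverse _).symm
    have hl0 : (3 : Int) = (((ing.take 3).reverse).length : Int) := by
      rw [List.length_reverse, List.length_take]
      omega
    rw [show ((0 : Int), ing.take 3, (3 : Int)) =
        ((0 : Int), ((ing.take 3).reverse).reverse, (((ing.take 3).reverse).length : Int)) by
      rw [← hr0, ← hl0]]
    rw [show (3 : Int).toNat = 3 from rfl]
    rw [foldl_run]
    rw [run_reduce _ _ _ (by
      rw [List.reverse_reverse]
      exact noocc_short (by rw [List.length_take]; omega))]
    rw [List.reverse_reverse, List.take_append_drop]
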